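-- pv_equiv track=rewrite | github.com/Arodrigues04/Trabalho-1-Estrutura-de-Dados | Trabalho 1.py | crypto
-- ===== SOURCE A (Python) =====
-- def crypto(chave):
--     lista_sequencia = [1]
--     numero = []  # inicializando as listas que vamos armazernar cada varíavel
--     for i in range(len(chave)):
--         numero.append(i + 2)  # adicionando na lista numero ignorando o 1
--     contador = 0
--     while True:
--         soma = 0
--         if contador >= len(chave):
--             break
--         else:
--             if chave[contador] == '+':  # Trabalhando com o sinal de +
--                 lista_sequencia.append(numero[contador])
--             elif chave[contador] == '-':  # Trabalhando com o sinal de -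
--                 resultado = len(chave[:contador])
--                 if not resultado:
--                     lista_sequencia.insert(-1, numero[contador])
--                 else:
--                     while True:
--                         if chave[resultado] != '-' or resultado < 0:
--                             break
--                         else:
--                             soma += 1
--                             resultado -= 1
--                     lista_sequencia.insert(-soma, numero[contador])
--             contador += 1
--     return lista_sequencia
-- ===== SOURCE B (Python) =====
-- def crypto(chave):
--     lista_sequencia = [1]
--     run = 0  # length of the current streak of consecutive '-' characters
--     for i, c in enumerate(chave):
--         if c == '-':
--             run += 1
--             lista_sequencia.insert(-run, i + 2)
--         else:
--             run = 0
--             if c == '+':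
--                 lista_sequencia.append(i + 2)
--     return lista_sequencia
-- ===== Notes on version B (the rewrite author's own statement) =====
-- stated objective: simpler
-- what changed: B is a single forward pass keeping an incremental counter of the current '-' streak and inserting at -run, eliminating A's pre-built index list, its while-loop outer scan and the nested backward rescan that recounts the streak (and its contador==0 special case).
import Mathlib
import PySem

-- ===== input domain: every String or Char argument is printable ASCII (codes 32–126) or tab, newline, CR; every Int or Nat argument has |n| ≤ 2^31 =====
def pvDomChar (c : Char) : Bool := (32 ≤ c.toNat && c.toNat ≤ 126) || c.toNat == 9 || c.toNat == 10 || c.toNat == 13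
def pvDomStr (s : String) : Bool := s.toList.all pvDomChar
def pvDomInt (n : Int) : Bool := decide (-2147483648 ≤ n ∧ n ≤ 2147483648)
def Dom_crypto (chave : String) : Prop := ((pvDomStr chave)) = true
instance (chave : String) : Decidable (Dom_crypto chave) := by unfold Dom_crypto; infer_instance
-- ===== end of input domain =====

-- B replaces A's nested backward rescan of '-' runs by a single forward pass with an incremental run counter (objective: simpler).

-- ===== PORT A =====
-- inner 'while True' of A: scans backward from `resultado` counting consecutive '-'
def cryptoInner (cs : List Char) (resultado soma : Int) : Int :=
  if _h : PySem.List.pyGetD cs resultado ' ' ≠ '-' ∨ resultado < 0 then soma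
  else cryptoInner cs (resultado - 1) (soma + 1)
termination_by (resultado + 2).toNat
decreasing_by omega

-- outer 'while True' of A, one step per `contador`
def cryptoOuter (cs : List Char) (numero : List Int) (contador : Int) (lista : List Int) : List Int :=
  if _h : contador ≥ (cs.length : Int) then lista
  else
    let c := PySem.List.pyGetD cs contador ' '
    let lista' :=
      if c = '+' then lista ++ [PySem.List.pyGetD numero contador 0]
      else if c = '-' then
        let resultado : Int := ((PySem.List.slice cs none (some contador)).length : Int)
        if resultado = 0 then PySem.List.insert lista (-1) (PySem.List.pyGetD numero contador 0)
        else PySem.List.insert lista (-(cryptoInner cs resultado 0)) (PySem.List.pyGetD numero contador 0)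
      else lista
    cryptoOuter cs numero (contador + 1) lista'
termination_by ((cs.length : Int) - contador).toNat
decreasing_by omega

def crypto (chave : String) : List Int :=
  let cs := chave.toList
  let numero := (PySem.List.pyRange 0 (cs.length : Int) 1).foldl (fun acc i => acc ++ [i + 2]) []
  cryptoOuter cs numero 0 [1]

-- ===== PORT B =====
-- loop body of B: state = (lista_sequencia, run)
def cryptoStep (st : List Int × Int) (p : Int × Char) : List Int × Int :=
  if p.2 = '-' then (PySem.List.insert st.1 (-(st.2 + 1)) (p.1 + 2), st.2 + 1)
  else if p.2 = '+' then (st.1 ++ [p.1 + 2], 0)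
  else (st.1, 0)

def crypto_alt (chave : String) : List Int :=
  ((PySem.List.enumerate chave.toList 0).foldl cryptoStep ([1], 0)).1

-- ===== PRECONDITION & SPEC =====
def Spec_crypto (chave : String) (out : List Int) : Prop := out = crypto_alt chave
instance (chave : String) (out : List Int) : Decidable (Spec_crypto chave out) := by unfold Spec_crypto; infer_instance

-- ===== CLAIM (what is proved, stated in full; the proofs are below) =====
def Claim_equal_crypto : Prop := ∀ (chave : String), Dom_crypto chave → Spec_crypto chave (crypto chave)

-- ===== LEMMAS AND PROOFS =====

-- length of the maximal streak of '-' ending just before index k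
def runLen (cs : List Char) : Nat → Nat
  | 0 => 0
  | k + 1 => if cs[k]? = some '-' then runLen cs k + 1 else 0

lemma inner_eq (cs : List Char) (k : Nat) (s : Int) (hk : k < cs.length)
    (hc : cs[k]? = some '-') : cryptoInner cs (k : Int) s = s + 1 + (runLen cs k : Int) := by
  have hchar : PySem.List.pyGetD cs (k : Int) ' ' = '-' := by
    simp only [PySem.List.pyGetD_natCast, List.getD_eq_getElem?_getD, hc, Option.getD_some]
  induction k generalizing s with
  | zero =>
      have h0 : PySem.List.pyGetD cs (0:Int) ' ' = '-' := by exact_mod_cast hchar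
      rw [cryptoInner]
      rw [dif_neg (by simp [h0])]
      rw [cryptoInner]
      rw [dif_pos (by right; omega)]
      simp [runLen]
  | succ k ih =>
      rw [cryptoInner]
      rw [dif_neg (not_or.mpr ⟨by push_cast at hchar ⊢; simp [hchar], by omega⟩)]
      have hcast : ((k + 1 : Nat) : Int) - 1 = (k : Int) := by push_cast; omega
      rw [hcast]
      by_cases hck : cs[k]? = some '-'
      · have hchark : PySem.List.pyGetD cs (k : Int) ' ' = '-' := by
          simp only [PySem.List.pyGetD_natCast, List.getD_eq_getElem?_getD, hck, Option.getD_some]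
        rw [ih (s+1) (by omega) hck hchark]
        simp [runLen, hck]
        ring
      · rw [cryptoInner]
        rw [dif_pos]
        · simp [runLen, hck]
        · left
          have hklt : k < cs.length := by omega
          simp only [PySem.List.pyGetD_natCast, List.getD_eq_getElem?_getD]
          rw [List.getElem?_eq_getElem hklt] at hck ⊢
          simp_all

def numeroOf (cs : List Char) : List Int := (PySem.List.pyRange 0 (cs.length : Int) 1).map (fun i => i + 2)

lemma main_eq (cs : List Char) : ∀ (m k : Nat) (lista : List Int), cs.length - k = m → k ≤ cs.length →
    cryptoOuter cs (numeroOf cs) (k : Int) lista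
      = ((PySem.List.enumerate (cs.drop k) (k : Int)).foldl cryptoStep (lista, (runLen cs k : Int))).1 := by
  intro m
  induction m with
  | zero =>
      intro k lista hm hk
      have hkeq : k = cs.length := by omega
      subst hkeq
      rw [cryptoOuter]
      rw [dif_pos (by omega)]
      simp [PySem.List.enumerate_nil]
  | succ m ih =>
      intro k lista hm hk
      have hklt : k < cs.length := by omega
      have hget : PySem.List.pyGetD cs (k : Int) ' ' = cs[k] := by
        simp [List.getD_eq_getElem?_getD, List.getElem?_eq_getElem hklt]
      have hnum : PySem.List.pyGetD (numeroOf cs) (k : Int) 0 = (k : Int) + 2 := by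
        exact PySem.List.pyGetD_map_pyRange _ _ _ _ hklt
      have hdrop : cs.drop k = cs[k] :: cs.drop (k + 1) := List.drop_eq_getElem_cons hklt
      have hres : ((PySem.List.slice cs none (some (k : Int))).length : Int) = (k : Int) := by
        rw [PySem.List.slice_to_natCast]
        simp [List.length_take]
        omega
      rw [cryptoOuter]
      rw [dif_neg (by omega)]
      simp only [hget, hnum, hres, hdrop, PySem.List.enumerate_cons, List.foldl_cons]
      have hsucc : ((k : Int) + 1) = ((k + 1 : Nat) : Int) := by push_cast; ring
      by_cases hminus : cs[k] = '-'
      · have hne : ¬ cs[k] = '+' := by rw [hminus]; decide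
        rw [if_neg hne, if_pos hminus]
        have hrunsucc : runLen cs (k + 1) = runLen cs k + 1 := by
          simp [runLen, List.getElem?_eq_getElem hklt, hminus]
        have hstep : cryptoStep (lista, (runLen cs k : Int)) ((k : Int), cs[k])
            = (PySem.List.insert lista (-((runLen cs k : Int) + 1)) ((k : Int) + 2), (runLen cs (k + 1) : Int)) := by
          simp [cryptoStep, hminus, hrunsucc]
        rw [hstep]
        by_cases hk0 : k = 0
        · subst hk0
          rw [if_pos (by norm_num)]
          have h1 : (-1 : Int) = -(((runLen cs 0 : Int)) + 1) := by simp [runLen]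
          rw [h1]
          rw [hsucc]
          exact ih 1 _ (by omega) (by omega)
        · rw [if_neg (by exact_mod_cast hk0)]
          have hsoma : cryptoInner cs (k : Int) 0 = 0 + 1 + (runLen cs k : Int) :=
            inner_eq cs k 0 hklt (by rw [List.getElem?_eq_getElem hklt, hminus])
          rw [hsoma]
          have h2 : -(0 + 1 + (runLen cs k : Int)) = -((runLen cs k : Int) + 1) := by ring
          rw [h2, hsucc]
          exact ih (k + 1) _ (by omega) (by omega)
      · have hrun0 : runLen cs (k + 1) = 0 := by
          simp [runLen, List.getElem?_eq_getElem hklt, hminus]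
        by_cases hplus : cs[k] = '+'
        · rw [if_pos hplus]
          have hstep : cryptoStep (lista, (runLen cs k : Int)) ((k : Int), cs[k])
              = (lista ++ [(k : Int) + 2], (runLen cs (k + 1) : Int)) := by
            simp [cryptoStep, hplus, hrun0]
          rw [hstep, hsucc]
          exact ih (k + 1) _ (by omega) (by omega)
        · rw [if_neg hplus, if_neg hminus]
          have hstep : cryptoStep (lista, (runLen cs k : Int)) ((k : Int), cs[k])
              = (lista, (runLen cs (k + 1) : Int)) := by
            simp [cryptoStep, hminus, hplus, hrun0]
          rw [hstep, hsucc]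
          exact ih (k + 1) _ (by omega) (by omega)

-- ===== VERDICT (by name: the statement is the Claim_ definition above) =====
lemma numero_foldl (cs : List Char) :
    (PySem.List.pyRange 0 (cs.length : Int) 1).foldl (fun acc i => acc ++ [i + 2]) [] = numeroOf cs := by
  simpa [numeroOf] using PySem.List.foldl_append_singleton_eq_map (fun i : Int => i + 2) (PySem.List.pyRange 0 (cs.length : Int) 1) []

theorem crypto_spec : Claim_equal_crypto := by
  intro chave _
  unfold Spec_crypto
  have h := main_eq chave.toList chave.toList.length 0 [1] rfl (Nat.zero_le _)
  simp only [List.drop_zero, Nat.cast_zero, runLen] at h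
  simp only [crypto, crypto_alt, numero_foldl]
  exact h
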